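-- pv_equiv track=rewrite | github.com/SuersserMann/Solidity | 比赛/词性归一预测.py | find_label_ranges
-- ===== SOURCE A (Python) =====
-- def find_label_ranges(t_index):
--     ranges = []
--     start_index = None
--     # t_index = extract_list(lst)
--     for i in range(len(t_index)):
--         if t_index[i] == 1 or t_index[i] == 2:
--             if start_index is None:
--                 start_index = i
--         else:
--             if start_index is not None:
--                 ranges.append([start_index, i - 1])
--                 start_index = None
--
--     if start_index is not None:
--         ranges.append([start_index, len(t_index) - 1])
--
--     return ranges
-- ===== SOURCE B (Python) =====
-- def find_label_ranges(t_index):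
--     mask = [x == 1 or x == 2 for x in t_index]
--     prev = [False] + mask          # mask shifted right: predicate at i-1 (zip truncates)
--     nxt = mask[1:] + [False]       # mask shifted left: predicate at i+1
--     starts = [i for i, (m, p) in enumerate(zip(mask, prev)) if m and not p]
--     ends = [i for i, (m, q) in enumerate(zip(mask, nxt)) if m and not q]
--     return [[s, e] for s, e in zip(starts, ends)]
-- ===== Notes on version B (the rewrite author's own statement) =====
-- stated objective: alternative
-- what changed: Replaced A's stateful scan with a start_index sentinel by stateless boundary detection: build the predicate mask, compare it with its right- and left-shifted copies to collect start and end indices as two filtered enumerations, and zip starts with ends.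
import Mathlib
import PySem

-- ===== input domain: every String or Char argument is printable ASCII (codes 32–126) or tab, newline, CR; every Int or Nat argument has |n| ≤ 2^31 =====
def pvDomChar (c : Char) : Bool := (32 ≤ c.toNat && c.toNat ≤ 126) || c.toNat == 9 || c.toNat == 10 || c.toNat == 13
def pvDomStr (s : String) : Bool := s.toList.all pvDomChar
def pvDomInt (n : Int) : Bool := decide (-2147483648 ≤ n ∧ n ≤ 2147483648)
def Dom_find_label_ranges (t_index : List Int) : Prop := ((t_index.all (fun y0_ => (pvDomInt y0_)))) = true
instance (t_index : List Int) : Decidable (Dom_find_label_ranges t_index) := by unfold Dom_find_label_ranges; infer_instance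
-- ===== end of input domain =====

-- ===== PORT A =====
-- B detects run boundaries by comparing the predicate mask with its two shifts and zips starts with ends (alternative decomposition, no running state); same return value.
-- A's loop state: index counter, optional open-range start, accumulated ranges.
def findGoA : List Int → Int → Option Int → List (List Int) → List (List Int)
  | [], n, start, ranges =>
      match start with
      | none => ranges
      | some s => ranges ++ [[s, n - 1]]
  | x :: xs, i, start, ranges =>
      if x == 1 || x == 2 then
        findGoA xs (i + 1) (match start with | none => some i | some s => some s) ranges
      else
        match start with
        | none => findGoA xs (i + 1) none ranges
        | some s => findGoA xs (i + 1) none (ranges ++ [[s, i - 1]])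

def find_label_ranges (t_index : List Int) : List (List Int) :=
  findGoA t_index 0 none []

-- ===== PORT B =====
-- x == 1 or x == 2
def altKey (x : Int) : Bool := x == 1 || x == 2

-- Source B line by line: mask, prev = [False] + mask, nxt = mask[1:] + [False],
-- two filtered enumerations of the zipped masks, then zip starts with ends.
def find_label_ranges_alt (t_index : List Int) : List (List Int) :=
  let mask := t_index.map altKey
  let prev := false :: mask
  let nxt := PySem.List.slice mask (some 1) none ++ [false]
  let starts := ((PySem.List.enumerate (mask.zip prev) 0).filter
      (fun p => p.2.1 && !p.2.2)).map (fun p => p.1)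
  let ends := ((PySem.List.enumerate (mask.zip nxt) 0).filter
      (fun p => p.2.1 && !p.2.2)).map (fun p => p.1)
  (starts.zip ends).map (fun p => [p.1, p.2])

-- ===== PRECONDITION & SPEC =====
def Spec_find_label_ranges (t_index : List Int) (out : List (List Int)) : Prop := out = find_label_ranges_alt t_index
instance (t_index : List Int) (out : List (List Int)) : Decidable (Spec_find_label_ranges t_index out) := by unfold Spec_find_label_ranges; infer_instance

-- ===== CLAIM (what is proved, stated in full; the proofs are below) =====
def Claim_equal_find_label_ranges : Prop := ∀ (t_index : List Int), Dom_find_label_ranges t_index → Spec_find_label_ranges t_index (find_label_ranges t_index)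

-- ===== LEMMAS AND PROOFS =====

-- A's machine with the accumulator factored out
def specA : Option Int → Int → List Int → List (List Int)
  | none, _, [] => []
  | some s, n, [] => [[s, n - 1]]
  | none, n, x :: xs => if altKey x then specA (some n) (n + 1) xs else specA none (n + 1) xs
  | some s, n, x :: xs => if altKey x then specA (some s) (n + 1) xs
      else [[s, n - 1]] ++ specA none (n + 1) xs

lemma findGoA_eq_specA (xs : List Int) : ∀ (i : Int) (st : Option Int) (ranges : List (List Int)),
    findGoA xs i st ranges = ranges ++ specA st i xs := by
  induction xs with
  | nil => intro i st ranges; cases st <;> simp [findGoA, specA]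
  | cons x xs ih =>
    intro i st ranges
    cases st with
    | none =>
      rw [findGoA, specA]
      cases h : altKey x with
      | true => have h' : (x == 1 || x == 2) = true := h; simp [h', ih]
      | false => have h' : (x == 1 || x == 2) = false := h; simp [h', ih]
    | some s =>
      rw [findGoA, specA]
      cases h : altKey x with
      | true => have h' : (x == 1 || x == 2) = true := h; simp [h', ih]
      | false => have h' : (x == 1 || x == 2) = false := h; simp [h', ih]

-- start indices given whether the previous position satisfied the predicate
def sRec : Bool → Int → List Bool → List Int
  | _, _, [] => []
  | prev, n, m :: ms => (if m && !prev then [n] else []) ++ sRec m (n + 1) ms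

-- end indices given whether the previous position satisfied the predicate (emits at the closing step, like A)
def eRec : Bool → Int → List Bool → List Int
  | prev, n, [] => if prev then [n - 1] else []
  | prev, n, m :: ms => (if prev && !m then [n - 1] else []) ++ eRec m (n + 1) ms

-- end indices by lookahead (B's formulation)
def eLook : Int → List Bool → List Int
  | _, [] => []
  | n, m :: ms => (if m && !(ms.headD false) then [n] else []) ++ eLook (n + 1) ms

def zipOut (s e : List Int) : List (List Int) := (s.zip e).map (fun p => [p.1, p.2])

lemma eRec_eq_shift (ms : List Bool) : ∀ (n : Int) (m : Bool),
    eRec m (n + 1) ms = (if m && !(ms.headD false) then [n] else []) ++ eLook (n + 1) ms := by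
  induction ms with
  | nil => intro n m; simp [eRec, eLook]
  | cons m' ms' ih =>
    intro n m
    rw [eRec, eLook]
    rw [ih (n + 1) m']
    simp [add_sub_cancel_right]

lemma eLook_eq_eRec (mask : List Bool) (n : Int) : eLook n mask = eRec false n mask := by
  cases mask with
  | nil => simp [eRec, eLook]
  | cons m ms =>
    rw [eRec, eLook, eRec_eq_shift ms n m]
    simp

-- main correspondence: A's machine equals zip of starts and ends
lemma specA_eq_zip (xs : List Int) : ∀ (n : Int),
    (specA none n xs = zipOut (sRec false n (xs.map altKey)) (eRec false n (xs.map altKey))) ∧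
    (∀ s : Int, specA (some s) n xs
        = zipOut (s :: sRec true n (xs.map altKey)) (eRec true n (xs.map altKey))) := by
  induction xs with
  | nil =>
    intro n
    refine ⟨by simp [specA, sRec, eRec, zipOut], ?_⟩
    intro s; simp [specA, sRec, eRec, zipOut]
  | cons x xs ih =>
    intro n
    constructor
    · rw [specA]
      cases h : altKey x with
      | true =>
        simp only [h, if_true, List.map_cons, sRec, eRec]
        rw [(ih (n + 1)).2 n]
        simp
      | false =>
        simp only [h, Bool.false_eq_true, if_false, List.map_cons, sRec, eRec]
        rw [(ih (n + 1)).1]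
        simp
    · intro s
      rw [specA]
      cases h : altKey x with
      | true =>
        simp only [h, if_true, List.map_cons, sRec, eRec]
        rw [(ih (n + 1)).2 s]
        simp
      | false =>
        simp only [h, Bool.false_eq_true, if_false, List.map_cons, sRec, eRec]
        rw [(ih (n + 1)).1]
        simp [zipOut]

-- B's filtered enumeration of (mask, false :: mask) equals sRec
lemma starts_eq_sRec (mask : List Bool) : ∀ (n : Int) (prev : Bool),
    ((PySem.List.enumerate (mask.zip (prev :: mask)) n).filter
        (fun p => p.2.1 && !p.2.2)).map (fun p => p.1) = sRec prev n mask := by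
  induction mask with
  | nil => intro n prev; simp [PySem.List.enumerate_nil, sRec]
  | cons m ms ih =>
    intro n prev
    have hz : (m :: ms).zip (prev :: m :: ms) = (m, prev) :: ms.zip (m :: ms) := by simp
    rw [hz, PySem.List.enumerate_cons, sRec]
    cases hc : (m && !prev) with
    | true => simp [hc, ih]
    | false => simp [hc, ih]

-- B's filtered enumeration of (mask, mask[1:] ++ [false]) equals eLook
lemma ends_eq_eLook (mask : List Bool) : ∀ (n : Int),
    ((PySem.List.enumerate (mask.zip (mask.tail ++ [false])) n).filter
        (fun p => p.2.1 && !p.2.2)).map (fun p => p.1) = eLook n mask := by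
  induction mask with
  | nil => intro n; simp [PySem.List.enumerate_nil, eLook]
  | cons m ms ih =>
    intro n
    have hz : (m :: ms).zip ((m :: ms).tail ++ [false])
        = (m, ms.headD false) :: ms.zip (ms.tail ++ [false]) := by
      cases ms <;> simp
    rw [hz, PySem.List.enumerate_cons, eLook]
    cases hm : m with
    | false => simp [ih]
    | true =>
      cases hh : ms.headD false with
      | true => simp [hh, ih]
      | false => simp [hh, ih]

-- ===== VERDICT (by name: the statement is the Claim_ definition above) =====
theorem find_label_ranges_spec : Claim_equal_find_label_ranges := by
  intro t_index _
  unfold Spec_find_label_ranges find_label_ranges find_label_ranges_alt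
  rw [findGoA_eq_specA, (specA_eq_zip t_index 0).1]
  simp only [PySem.List.slice_from_one]
  rw [starts_eq_sRec (t_index.map altKey) 0 false]
  rw [ends_eq_eLook (t_index.map altKey) 0, eLook_eq_eRec]
  simp [zipOut]
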